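-- pv_equiv track=rewrite | github.com/OluwaToni04/MyPythonShell | MyPythonShell.py | split_pipeline
-- ===== SOURCE A (Python) =====
-- def split_pipeline(tokens):
--     if "|" not in tokens:
--         return None
--     commands = []
--     current_cmd = []
--     for token in tokens:
--         if token == "|":
--             if current_cmd: commands.append(current_cmd)
--             current_cmd = []
--         else:
--             current_cmd.append(token)
--     if current_cmd:
--         commands.append(current_cmd)
--     return commands
-- ===== SOURCE B (Python) =====
-- def split_pipeline(tokens):
--     if "|" not in tokens:
--         return None
--     res = []
--     rest = tokens
--     while "|" in rest:
--         i = rest.index("|")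
--         if i:
--             res.append(rest[:i])
--         rest = rest[i + 1:]
--     if rest:
--         res.append(rest)
--     return res
-- ===== Notes on version B (the rewrite author's own statement) =====
-- stated objective: alternative
-- what changed: Replaces the token-by-token accumulator loop (current_cmd/commands with per-token branching) by a delimiter-jumping loop: repeatedly locate the next '|' with list.index, slice off the command group before it, and continue on the remainder.
import Mathlib
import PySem

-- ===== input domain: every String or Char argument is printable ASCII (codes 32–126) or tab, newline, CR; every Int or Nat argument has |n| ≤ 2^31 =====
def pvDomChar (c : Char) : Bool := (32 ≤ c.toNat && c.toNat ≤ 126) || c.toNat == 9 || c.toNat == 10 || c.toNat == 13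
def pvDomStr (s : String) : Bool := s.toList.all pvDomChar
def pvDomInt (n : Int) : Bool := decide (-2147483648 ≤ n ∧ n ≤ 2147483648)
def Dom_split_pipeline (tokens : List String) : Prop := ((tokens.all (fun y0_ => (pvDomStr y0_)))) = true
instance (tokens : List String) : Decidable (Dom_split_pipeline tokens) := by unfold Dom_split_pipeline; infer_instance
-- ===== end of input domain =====

-- B replaces A's token-by-token accumulator loop by a delimiter-jumping loop (list.index + slicing); alternative decomposition, same return value.


-- ===== PORT A =====
-- loop body of A's for-loop: state = (commands, current_cmd)
def pvStepA (s : List (List String) × List String) (token : String) : List (List String) × List String :=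
  if token = "|" then
    (if s.2 ≠ [] then s.1 ++ [s.2] else s.1, [])
  else
    (s.1, s.2 ++ [token])

def split_pipeline (tokens : List String) : Option (List (List String)) :=
  if "|" ∉ tokens then none
  else
    let s := tokens.foldl pvStepA ([], [])
    some (if s.2 ≠ [] then s.1 ++ [s.2] else s.1)

-- ===== PORT B =====
-- B's while loop: rest.index("|") → PySem.List.index? (some under the membership guard);
-- rest[:i] → slice none i, rest[i+1:] → slice (i+1) none.
def pvChopB (res : List (List String)) (rest : List String) : List (List String) :=
  if "|" ∈ rest then
    match PySem.List.index? rest "|" with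
    | some i =>
        pvChopB (if i ≠ 0 then res ++ [PySem.List.slice rest none (some (i : Int))] else res)
                (PySem.List.slice rest (some ((i : Int) + 1)) none)
    | none => res   -- unreachable under the membership guard
  else if rest ≠ [] then res ++ [rest] else res
termination_by rest.length
decreasing_by
  have hne : rest ≠ [] := List.ne_nil_of_mem (by assumption)
  have h1 : ((i : Int) + 1) = ((i + 1 : Nat) : Int) := by push_cast; ring
  rw [h1, PySem.List.slice_from_natCast]
  have : 0 < rest.length := List.length_pos_iff.mpr hne
  simp only [List.length_drop]; omega

def split_pipeline_alt (tokens : List String) : Option (List (List String)) :=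
  if "|" ∉ tokens then none
  else some (pvChopB [] tokens)

-- ===== PRECONDITION & SPEC =====
def Spec_split_pipeline (tokens : List String) (out : Option (List (List String))) : Prop := out = split_pipeline_alt tokens
instance (tokens : List String) (out : Option (List (List String))) : Decidable (Spec_split_pipeline tokens out) := by unfold Spec_split_pipeline; infer_instance

-- ===== CLAIM (what is proved, stated in full; the proofs are below) =====
def Claim_equal_split_pipeline : Prop := ∀ (tokens : List String), Dom_split_pipeline tokens → Spec_split_pipeline tokens (split_pipeline tokens)

-- ===== LEMMAS AND PROOFS =====

-- proof-only reference splitter: groups of tokens between pipes (empty groups kept)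
def gsplit : List String → List (List String)
  | [] => [[]]
  | t :: ts =>
    let g := gsplit ts
    if t = "|" then [] :: g else (t :: g.headI) :: g.tail

-- prepend cur to the first group
def pvHp (cur : List String) : List (List String) → List (List String)
  | [] => [cur]
  | g :: gs => (cur ++ g) :: gs

theorem hp_nil_filter (l : List (List String)) :
    (pvHp [] l).filter (fun g => !g.isEmpty) = l.filter (fun g => !g.isEmpty) := by
  cases l <;> simp [pvHp]

theorem foldA (ts : List String) : ∀ (cs : List (List String)) (cur : List String),
    (let s := ts.foldl pvStepA (cs, cur); if s.2 ≠ [] then s.1 ++ [s.2] else s.1)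
      = cs ++ (pvHp cur (gsplit ts)).filter (fun g => !g.isEmpty) := by
  induction ts with
  | nil =>
    intro cs cur
    by_cases h : cur = [] <;> simp [gsplit, pvHp, h]
  | cons t ts ih =>
    intro cs cur
    by_cases ht : t = "|"
    · subst ht
      have step : pvStepA (cs, cur) "|" = (if cur ≠ [] then cs ++ [cur] else cs, []) := by
        simp [pvStepA]
      rw [List.foldl_cons, step, ih, hp_nil_filter]
      have hsp : pvHp cur (gsplit ("|" :: ts)) = cur :: gsplit ts := by
        simp [gsplit, pvHp]
      rw [hsp, List.filter_cons]
      by_cases h : cur = [] <;> simp [h]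
    · have step : pvStepA (cs, cur) t = (cs, cur ++ [t]) := by simp [pvStepA, ht]
      rw [List.foldl_cons, step, ih]
      have hsp : pvHp cur (gsplit (t :: ts)) = pvHp (cur ++ [t]) (gsplit ts) := by
        cases hg : gsplit ts <;> (simp [gsplit, pvHp, ht, hg]; try rfl)
      rw [hsp]

theorem gsplit_no_pipe (rest : List String) (h : "|" ∉ rest) : gsplit rest = [rest] := by
  induction rest with
  | nil => rfl
  | cons t ts ih =>
    have ht : t ≠ "|" := fun e => h (e ▸ List.mem_cons_self)
    have hts : "|" ∉ ts := fun m => h (List.mem_cons_of_mem _ m)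
    simp [gsplit, ht, ih hts]

theorem gsplit_append_pipe (pre suf : List String) (h : "|" ∉ pre) :
    gsplit (pre ++ "|" :: suf) = pre :: gsplit suf := by
  induction pre with
  | nil => simp [gsplit]
  | cons t pre ih =>
    have ht : t ≠ "|" := fun e => h (e ▸ List.mem_cons_self)
    have hp : "|" ∉ pre := fun m => h (List.mem_cons_of_mem _ m)
    simp [gsplit, ht, ih hp]

theorem chopB_eq (res : List (List String)) (rest : List String) :
    pvChopB res rest = res ++ (gsplit rest).filter (fun g => !g.isEmpty) := by
  induction res, rest using pvChopB.induct with
  | case1 res rest hm i hi ih =>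
    rw [pvChopB.eq_def]
    simp only [hm, if_true, hi]
    simp only [dite_eq_ite] at ih
    rw [ih]
    obtain ⟨pre, suf, hrest, hlen, hpre⟩ := (PySem.List.index?_eq_some_iff rest "|" i).mp hi
    subst hrest
    have hs1 : PySem.List.slice (pre ++ "|" :: suf) none (some (i : Int)) = pre := by
      rw [PySem.List.slice_to_natCast, ← hlen, List.take_left]
    have hcast : ((i : Int) + 1) = ((i + 1 : Nat) : Int) := by push_cast; ring
    have hs2 : PySem.List.slice (pre ++ "|" :: suf) (some ((i : Int) + 1)) none = suf := by
      rw [hcast, PySem.List.slice_from_natCast, ← hlen]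
      have hsplit : pre ++ "|" :: suf = (pre ++ ["|"]) ++ suf := by simp
      have hlen2 : (pre ++ ["|"]).length = pre.length + 1 := by simp
      rw [hsplit, ← hlen2, List.drop_left]
    rw [hs1, hs2, gsplit_append_pipe pre suf hpre, List.filter_cons]
    by_cases hp0 : pre = []
    · subst hp0
      simp only [List.length_nil] at hlen
      simp [← hlen]
    · have hne : i ≠ 0 := by rw [← hlen]; simpa using hp0
      simp [hne, hp0]
  | case2 res rest hm hi =>
    exact absurd hm ((PySem.List.index?_eq_none_iff rest "|").mp hi)
  | case3 res rest hm h0 =>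
    rw [pvChopB.eq_def]
    simp only [hm, if_false]
    rw [gsplit_no_pipe rest hm, List.filter_cons]
    simp [h0]
  | case4 res rest hm h0 =>
    rw [not_ne_iff] at h0
    subst h0
    rw [pvChopB.eq_def]
    simp [gsplit]

-- ===== VERDICT (by name: the statement is the Claim_ definition above) =====
theorem split_pipeline_spec : Claim_equal_split_pipeline := by
  intro tokens _
  unfold Spec_split_pipeline split_pipeline split_pipeline_alt
  by_cases hm : "|" ∈ tokens
  · simp only [hm, not_true_eq_false, if_false]
    rw [chopB_eq [] tokens, List.nil_append, foldA tokens [] []]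
    rw [hp_nil_filter, List.nil_append]
  · simp [hm]
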